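-- pv_equiv track=rewrite | github.com/RounakRaju/AI-Lab-1st-CLP | clp_01.py | digit_count_sum
-- ===== SOURCE A (Python) =====
-- def digit_count_sum(a):
--     a = abs(a)
--     b = 0
--     c = 0
--     if a == 0:
--         return 1, 0
--
--     while a > 0:
--         d = a % 10
--         c = c + d
--         b = b + 1
--         a = a // 10
--     return b, c
-- ===== SOURCE B (Python) =====
-- def digit_count_sum(a):
--     s = str(abs(a))
--     return len(s), sum(ord(c) - 48 for c in s)
-- ===== Notes on version B (the rewrite author's own statement) =====
-- stated objective: idiomatic
-- what changed: Replaces the while-loop of repeated modulus/division digit extraction (with a special case for zero) by the decimal string representation str(abs(a)): the digit count is its length and the digit sum a single pass over its characters.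
import Mathlib
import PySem

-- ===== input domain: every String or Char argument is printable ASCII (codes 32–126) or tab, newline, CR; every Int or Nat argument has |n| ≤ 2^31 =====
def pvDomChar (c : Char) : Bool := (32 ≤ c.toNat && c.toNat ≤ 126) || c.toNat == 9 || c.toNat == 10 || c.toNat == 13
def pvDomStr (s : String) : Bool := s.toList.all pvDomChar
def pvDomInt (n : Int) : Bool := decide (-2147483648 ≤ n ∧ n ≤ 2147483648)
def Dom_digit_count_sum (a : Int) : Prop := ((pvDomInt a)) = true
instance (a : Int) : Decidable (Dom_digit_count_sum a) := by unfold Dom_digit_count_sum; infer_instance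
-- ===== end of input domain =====

-- B replaces A's while-loop digit extraction (modulus/division, special case for zero) by the decimal
-- string str(abs(a)): digit count = its length, digit sum = one pass over its characters.


-- ===== PORT A =====
-- the 'while a > 0' loop with state (a, b, c)
def pvLoopA (a b c : Int) : Int × Int :=
  if a > 0 then
    pvLoopA (PySem.Int.floordiv a 10) (b + 1) (c + PySem.Int.mod a 10)
  else (b, c)
termination_by a.toNat
decreasing_by
  have h2 : PySem.Int.floordiv a 10 = a / 10 := by
    show a.fdiv 10 = a / 10
    rw [Int.fdiv_eq_ediv]; norm_num
  rw [h2]; omega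

def digit_count_sum (a : Int) : Int × Int :=
  let a := |a|
  if a = 0 then (1, 0)
  else pvLoopA a 0 0

-- ===== PORT B =====
def digit_count_sum_alt (a : Int) : Int × Int :=
  let s := PySem.Int.toStr |a|
  (PySem.Str.len s, (s.toList.map (fun c => (c.toNat : Int) - 48)).sum)

-- ===== PRECONDITION & SPEC =====
def Spec_digit_count_sum (a : Int) (out : Int × Int) : Prop := out = digit_count_sum_alt a
instance (a : Int) (out : Int × Int) : Decidable (Spec_digit_count_sum a out) := by unfold Spec_digit_count_sum; infer_instance

-- ===== CLAIM (what is proved, stated in full; the proofs are below) =====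
def Claim_equal_digit_count_sum : Prop := ∀ (a : Int), Dom_digit_count_sum a → Spec_digit_count_sum a (digit_count_sum a)

-- ===== LEMMAS AND PROOFS =====

-- with enough fuel, toDigitsCore is toDigits followed by the accumulator
lemma toDigitsCore_eq (n : Nat) : ∀ (f : Nat), n < f → ∀ (ds : List Char),
    Nat.toDigitsCore 10 f n ds = Nat.toDigits 10 n ++ ds := by
  induction n using Nat.strong_induction_on with
  | _ n ih =>
    intro f hf ds
    match f with
    | f + 1 =>
      rw [Nat.toDigits, Nat.toDigitsCore, Nat.toDigitsCore]
      by_cases h : n / 10 = 0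
      · simp [h]
      · simp only [h, if_false]
        have hn : 0 < n := by omega
        have hd : n / 10 < n := Nat.div_lt_self hn (by norm_num)
        rw [ih (n / 10) hd f (by omega), ih (n / 10) hd n (by omega)]
        simp

lemma toDigits_lt10 (n : Nat) (h : n < 10) : Nat.toDigits 10 n = [Nat.digitChar n] := by
  rw [Nat.toDigits, Nat.toDigitsCore]
  simp [Nat.div_eq_of_lt h, Nat.mod_eq_of_lt h]

lemma toDigits_ge10 (n : Nat) (h : 10 ≤ n) :
    Nat.toDigits 10 n = Nat.toDigits 10 (n / 10) ++ [Nat.digitChar (n % 10)] := by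
  rw [Nat.toDigits, Nat.toDigitsCore]
  have h0 : ¬ n / 10 = 0 := by omega
  simp only [h0, if_false]
  exact toDigitsCore_eq (n / 10) n (Nat.div_lt_self (by omega) (by norm_num)) _

lemma digitChar_val (d : Nat) (h : d < 10) : ((Nat.digitChar d).toNat : Int) - 48 = d := by
  interval_cases d <;> decide

-- loop invariant: pvLoopA on a positive n adds the digit count and digit sum of n
lemma pvLoopA_eq (n : Nat) (hn : 0 < n) : ∀ (b c : Int),
    pvLoopA (n : Int) b c =
      (b + ((Nat.toDigits 10 n).length : Int),
       c + ((Nat.toDigits 10 n).map (fun ch => (ch.toNat : Int) - 48)).sum) := by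
  induction n using Nat.strong_induction_on with
  | _ n ih =>
    intro b c
    rw [pvLoopA]
    have hpos : (n : Int) > 0 := by exact_mod_cast hn
    simp only [hpos, if_pos]
    have hfd : PySem.Int.floordiv (n : Int) 10 = ((n / 10 : Nat) : Int) := by
      show ((n : Int)).fdiv 10 = _
      rw [Int.fdiv_eq_ediv]
      norm_num
    have hmd : PySem.Int.mod (n : Int) 10 = ((n % 10 : Nat) : Int) := by
      show ((n : Int)).fmod 10 = _
      rw [Int.fmod_eq_emod]
      norm_num
    rw [hfd, hmd]
    by_cases h : n < 10
    · have h0 : n / 10 = 0 := Nat.div_eq_of_lt h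
      have hm : n % 10 = n := Nat.mod_eq_of_lt h
      rw [h0, hm, pvLoopA]
      simp only [toDigits_lt10 n h, List.length_singleton, List.map_cons, List.map_nil,
        List.sum_cons, List.sum_nil, digitChar_val n h]
      norm_num
    · have hd : n / 10 < n := Nat.div_lt_self hn (by norm_num)
      have hdp : 0 < n / 10 := by omega
      rw [ih (n / 10) hd hdp]
      rw [toDigits_ge10 n (by omega)]
      simp only [List.length_append, List.map_append, List.sum_append, List.map_cons,
        List.map_nil, List.sum_cons, List.sum_nil, List.length_singleton,
        digitChar_val (n % 10) (Nat.mod_lt n (by norm_num))]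
      push_cast
      simp only [Prod.mk.injEq]
      constructor <;> ring

-- ===== VERDICT (by name: the statement is the Claim_ definition above) =====
theorem digit_count_sum_spec : Claim_equal_digit_count_sum := by
  intro a _
  show digit_count_sum a = digit_count_sum_alt a
  have hts : (PySem.Int.toStr |a|).toList = Nat.toDigits 10 a.natAbs := by
    rw [PySem.Int.toList_toStr]
    unfold PySem.Int.toChars
    rw [if_neg (by simp : ¬ |a| < 0)]
    congr 1
    rw [Int.abs_eq_natAbs, Int.toNat_natCast]
  by_cases h0 : |a| = 0
  · have ha : a = 0 := abs_eq_zero.mp h0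
    subst ha
    decide
  · simp only [digit_count_sum, digit_count_sum_alt, h0, if_false]
    have habs : |a| = ((a.natAbs : Nat) : Int) := Int.abs_eq_natAbs a
    have hpos : 0 < a.natAbs := Int.natAbs_pos.mpr (by intro h; exact h0 (by simp [h]))
    have hl : pvLoopA |a| 0 0 =
        ((0 : Int) + ((Nat.toDigits 10 a.natAbs).length : Int),
         (0 : Int) + ((Nat.toDigits 10 a.natAbs).map (fun ch => (ch.toNat : Int) - 48)).sum) := by
      rw [habs]; exact pvLoopA_eq a.natAbs hpos 0 0
    rw [hl]
    simp [PySem.Str.len, hts]
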